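-- pv_equiv track=rewrite | github.com/NahinM/CSE331 | Checkers/python/package/CheckerFuns/checkerFun_kkp_Fall25.py | question9
-- ===== SOURCE A (Python) =====
-- def question9(L:str) -> bool:
--     one = 0
--     zero = 0
--     for c in L:
--         if c=='0': zero+=1
--         else: one+=1
--         if zero>=3: return True
--     return one==2
-- ===== SOURCE B (Python) =====
-- def question9(L: str) -> bool:
--     # Locate the third '0' by chained substring searches instead of counting.
--     i = L.find('0')
--     if i != -1:
--         i = L.find('0', i + 1)
--     if i != -1:
--         i = L.find('0', i + 1)
--     if i != -1:
--         return True
--     return len([c for c in L if c != '0']) == 2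
-- ===== Notes on version B (the rewrite author's own statement) =====
-- stated objective: alternative
-- what changed: B locates the third '0' by three chained str.find substring searches (early success replaces A's early-exit counter) and, when no third '0' exists, checks the non-'0' residue by filtering, instead of A's single pass with two accumulating counters.
import Mathlib
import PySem

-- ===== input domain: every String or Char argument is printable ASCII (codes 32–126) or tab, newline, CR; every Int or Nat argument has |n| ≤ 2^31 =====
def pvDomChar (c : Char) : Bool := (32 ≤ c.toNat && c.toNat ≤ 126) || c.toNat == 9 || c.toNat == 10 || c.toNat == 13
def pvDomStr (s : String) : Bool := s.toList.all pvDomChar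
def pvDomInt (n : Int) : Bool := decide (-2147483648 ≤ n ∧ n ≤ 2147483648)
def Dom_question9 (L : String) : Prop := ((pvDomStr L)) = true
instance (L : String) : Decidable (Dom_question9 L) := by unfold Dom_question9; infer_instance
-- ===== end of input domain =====

-- B locates the third '0' by chained str.find substring searches and checks the
-- non-'0' residue by filtering, instead of A's counting loop (objective: alternative).

-- ===== PORT A =====
-- A's loop: counters one/zero, early return True as soon as zero reaches 3, else one == 2 at the end.
def question9Loop : List Char → Nat → Nat → Bool
  | [], one, _ => one == 2
  | c :: cs, one, zero =>
    let zero' := if c = '0' then zero + 1 else zero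
    let one'  := if c = '0' then one else one + 1
    if 3 ≤ zero' then true else question9Loop cs one' zero'

def question9 (L : String) : Bool := question9Loop L.toList 0 0

-- ===== PORT B =====
-- Source B: i = L.find('0'); twice 'if i != -1: i = L.find('0', i+1)'; the third hit means True,
-- otherwise len([c for c in L if c != '0']) == 2 (the comprehension is the filter).
def question9_alt (L : String) : Bool :=
  let i := PySem.Str.find L "0"
  let i := if i != -1 then PySem.Str.findFrom L "0" (i + 1) none else i
  let i := if i != -1 then PySem.Str.findFrom L "0" (i + 1) none else i
  if i != -1 then true
  else decide ((L.toList.filter (fun c => c != '0')).length = 2)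

-- ===== PRECONDITION & SPEC =====
def Spec_question9 (L : String) (out : Bool) : Prop := out = question9_alt L
instance (L : String) (out : Bool) : Decidable (Spec_question9 L out) := by unfold Spec_question9; infer_instance

-- ===== CLAIM (what is proved, stated in full; the proofs are below) =====
def Claim_equal_question9 : Prop := ∀ (L : String), Dom_question9 L → Spec_question9 L (question9 L)

-- ===== LEMMAS AND PROOFS =====

-- A's loop result, characterised by the '0'-count of the remaining input.
theorem question9Loop_true_iff (cs : List Char) (one zero : Nat) (h : zero < 3) :
    question9Loop cs one zero = true ↔
      (3 ≤ zero + cs.count '0' ∨ one + (cs.length - cs.count '0') = 2) := by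
  induction cs generalizing one zero with
  | nil => simp [question9Loop]; omega
  | cons c cs ih =>
    have hle : cs.count '0' ≤ cs.length := List.count_le_length
    by_cases hc : c = '0'
    · subst hc
      by_cases h3 : 3 ≤ zero + 1
      · simp [question9Loop, h3]; omega
      · simp [question9Loop, h3, ih one (zero + 1) (by omega)]; omega
    · simp [question9Loop, hc, show ¬ 3 ≤ zero by omega, ih (one + 1) zero h]; omega

-- a one-char pattern is a prefix of l.drop j iff l[j] is that char
theorem pref (l : List Char) (c : Char) (j : Nat) : [c] <+: l.drop j ↔ l[j]? = some c := by
  rw [List.cons_prefix_iff]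
  constructor
  · rintro ⟨t, ht, -⟩
    have := congrArg List.head? ht
    simpa [List.head?_drop] using this
  · intro h
    have hj : j < l.length := by
      by_contra hge
      simp [List.getElem?_eq_none (by omega : l.length ≤ j)] at h
    exact ⟨l.drop (j+1), by rw [List.drop_eq_getElem_cons hj]; simp_all, by simp⟩

-- first occurrence found ⇒ the count decomposes across that index
theorem find_count_pos (l : List Char) (c : Char) (h : PySem.Chars.find l [c] ≠ -1) :
    (PySem.Chars.find l [c]).toNat < l.length ∧
      l.count c = (l.drop ((PySem.Chars.find l [c]).toNat + 1)).count c + 1 := by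
  have h0 : 0 ≤ PySem.Chars.find l [c] :=
    (PySem.Chars.find_nonneg_iff l [c]).mpr ((PySem.Chars.find_ne_neg_one_iff l [c]).mp h)
  obtain ⟨hpre, hmin⟩ := PySem.Chars.find_spec h0
  set j := (PySem.Chars.find l [c]).toNat with hj
  have hjc : l[j]? = some c := (pref l c j).mp hpre
  have hjl : j < l.length := by
    by_contra hge
    simp [List.getElem?_eq_none (by omega : l.length ≤ j)] at hjc
  refine ⟨hjl, ?_⟩
  have htake : (l.take j).count c = 0 := by
    rw [List.count_eq_zero]
    intro hmem
    obtain ⟨i, hi, hieq⟩ := List.mem_take_iff_getElem.mp hmem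
    have : ¬ [c] <+: l.drop i := hmin i (by omega)
    rw [pref] at this
    exact this (by rw [List.getElem?_eq_getElem (by omega)]; simp [hieq])
  have hsplit : l = l.take j ++ l.drop j := (List.take_append_drop j l).symm
  have hdrop : l.drop j = c :: l.drop (j+1) := by
    rw [List.drop_eq_getElem_cons hjl]
    have : l[j] = c := by
      have := List.getElem?_eq_getElem hjl
      rw [hjc] at this; exact (Option.some.inj this).symm
    rw [this]
  calc l.count c = (l.take j ++ l.drop j).count c := by rw [← hsplit]
    _ = (l.take j).count c + (l.drop j).count c := List.count_append ..
    _ = (l.drop (j+1)).count c + 1 := by rw [htake, hdrop]; simp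

-- no occurrence ⇒ count 0
theorem find_none_count (l : List Char) (c : Char) (h : PySem.Chars.find l [c] = -1) :
    l.count c = 0 := by
  have h1 := (PySem.Chars.find_eq_neg_one_iff l [c]).mp h
  rw [List.count_eq_zero]
  intro hm
  obtain ⟨s, t, rfl⟩ := List.append_of_mem hm
  exact h1 ⟨s, t, by simp⟩

theorem chars_zero : "0".toList = ['0'] := by decide

-- B's find-chain succeeds exactly when the '0'-count is at least 3
theorem alt_iff (L : String) :
    question9_alt L = true ↔
      (3 ≤ L.toList.count '0' ∨ (L.toList.filter (fun c => c != '0')).length = 2) := by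
  unfold question9_alt
  simp only [PySem.Str.find_eq, PySem.Str.findFrom_eq, chars_zero]
  set cs := L.toList with hcs
  by_cases h0 : PySem.Chars.find cs ['0'] = -1
  · have hc := find_none_count cs '0' h0
    simp [h0, hc]
  · obtain ⟨hj0, hc0⟩ := find_count_pos cs '0' h0
    set j0 := (PySem.Chars.find cs ['0']).toNat with hj0d
    have hf0 : PySem.Chars.find cs ['0'] = (j0 : Int) :=
      (Int.toNat_of_nonneg ((PySem.Chars.find_nonneg_iff cs ['0']).mpr
        ((PySem.Chars.find_ne_neg_one_iff cs ['0']).mp h0))).symm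
    have harg1 : (j0 : Int) + 1 = ((j0 + 1 : Nat) : Int) := by push_cast; ring
    have hrw1 := PySem.Chars.findFrom_natCast cs ['0'] (j0 + 1) (by omega)
    by_cases h1 : PySem.Chars.find (cs.drop (j0 + 1)) ['0'] = -1
    · have hc1 := find_none_count _ '0' h1
      have hA1 : PySem.Chars.findFrom cs ['0'] ((j0 : Int) + 1) none = -1 := by
        rw [harg1, hrw1]; simp [h1]
      simp [hf0, hA1]
      omega
    · obtain ⟨hj1, hc1⟩ := find_count_pos _ '0' h1
      set r1 := (PySem.Chars.find (cs.drop (j0 + 1)) ['0']).toNat with hr1d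
      have hf1 : PySem.Chars.find (cs.drop (j0 + 1)) ['0'] = (r1 : Int) :=
        (Int.toNat_of_nonneg ((PySem.Chars.find_nonneg_iff _ ['0']).mpr
          ((PySem.Chars.find_ne_neg_one_iff _ ['0']).mp h1))).symm
      have hA1 : PySem.Chars.findFrom cs ['0'] ((j0 : Int) + 1) none
          = (j0 : Int) + 1 + (r1 : Int) := by
        rw [harg1, hrw1, if_neg h1, hf1]
      have hne1 : ¬((j0 : Int) + 1 + (r1 : Int) = -1) := by omega
      have hdd : (cs.drop (j0 + 1)).drop (r1 + 1) = cs.drop (j0 + 1 + r1 + 1) := by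
        rw [List.drop_drop]; congr 1
      have harg2 : (j0 : Int) + 1 + (r1 : Int) + 1 = ((j0 + 1 + r1 + 1 : Nat) : Int) := by
        push_cast; ring
      have hlen1 : (cs.drop (j0 + 1)).length = cs.length - (j0 + 1) := by simp
      have hrw2 := PySem.Chars.findFrom_natCast cs ['0'] (j0 + 1 + r1 + 1) (by omega)
      by_cases h2 : PySem.Chars.find (cs.drop (j0 + 1 + r1 + 1)) ['0'] = -1
      · have hc2 := find_none_count _ '0' h2
        have hA2 : PySem.Chars.findFrom cs ['0'] ((j0 : Int) + 1 + (r1 : Int) + 1) none = -1 := by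
          rw [harg2, hrw2]; simp [h2]
        simp [hf0, hA1, hA2, hne1]
        rw [hdd, hc2] at hc1
        omega
      · have hA2 : PySem.Chars.findFrom cs ['0'] ((j0 : Int) + 1 + (r1 : Int) + 1) none ≠ -1 := by
          rw [harg2, hrw2]
          have hf2 : 0 ≤ PySem.Chars.find (cs.drop (j0 + 1 + r1 + 1)) ['0'] :=
            (PySem.Chars.find_nonneg_iff _ ['0']).mpr
              ((PySem.Chars.find_ne_neg_one_iff _ ['0']).mp h2)
          simp [h2]; omega
        obtain ⟨-, hc2⟩ := find_count_pos _ '0' h2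
        simp [hf0, hA1, hA2, hne1]
        rw [hdd] at hc1
        omega

-- the filtered residue and the '0'-count partition the string
theorem filt (l : List Char) : (l.filter (fun c => c != '0')).length + l.count '0' = l.length := by
  induction l with
  | nil => simp
  | cons a l ih =>
    by_cases h : a = '0' <;> simp [h] <;> omega

-- ===== VERDICT (by name: the statement is the Claim_ definition above) =====
theorem question9_spec : Claim_equal_question9 := by
  intro L _
  show question9 L = question9_alt L
  have hf := filt L.toList
  have hle : L.toList.count '0' ≤ L.toList.length := List.count_le_length
  rw [Bool.eq_iff_iff, alt_iff]
  unfold question9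
  rw [question9Loop_true_iff _ 0 0 (by omega)]
  simp only [Nat.zero_add]
  omega
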